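-- pv_equiv track=rewrite | github.com/fedden/gpt | autograd-engine/ag/tensor/slicing_utils.py | _nd_i_to_1d_i
-- ===== SOURCE A (Python) =====
-- def _nd_i_to_1d_i(shape: tuple[int, ...], nd_i: tuple[int, ...]) -> int:
--     """Convert multi-dim indices to 1D index for `self.data`."""
--     assert len(nd_i) == len(shape), (
--         f"Number of indices ({len(nd_i)}) does not match number of "
--         f"dimensions ({len(shape)})."
--     )
--     index: int = 0
--     for dim, dim_i in enumerate(nd_i):
--         assert dim_i < shape[dim], (
--             f"Index {dim_i} is out of bounds for dimension {dim} with "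
--             f"shape {shape[dim]}."
--         )
--         index *= shape[dim]
--         index += dim_i
--     return index
-- ===== SOURCE B (Python) =====
-- def _nd_i_to_1d_i(shape: tuple[int, ...], nd_i: tuple[int, ...]) -> int:
--     """Flatten an nd index: precompute a strides table, then take a dot product."""
--     assert len(nd_i) == len(shape), (
--         f"rank mismatch: got {len(nd_i)} indices for {len(shape)} dimensions"
--     )
--     # Right-to-left pass: strides[d] = product of the extents to the right of d.
--     strides = []
--     running = 1
--     for extent in reversed(shape):
--         strides.append(running)
--         running *= extent
--     strides.reverse()
--     # Left-to-right dot product, checking bounds in dimension order.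
--     total = 0
--     for dim, (i, extent) in enumerate(zip(nd_i, shape)):
--         assert i < extent, f"index {i} exceeds extent {extent} of dimension {dim}"
--         total += strides[dim] * i
--     return total
-- ===== Notes on version B (the rewrite author's own statement) =====
-- stated objective: alternative
-- what changed: Replaces the interleaved Horner accumulation (index = index*shape[dim] + dim_i in one loop) by two passes: a right-to-left loop precomputing a strides table of suffix products, then a left-to-right dot product index += strides[dim]*dim_i.
import Mathlib
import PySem

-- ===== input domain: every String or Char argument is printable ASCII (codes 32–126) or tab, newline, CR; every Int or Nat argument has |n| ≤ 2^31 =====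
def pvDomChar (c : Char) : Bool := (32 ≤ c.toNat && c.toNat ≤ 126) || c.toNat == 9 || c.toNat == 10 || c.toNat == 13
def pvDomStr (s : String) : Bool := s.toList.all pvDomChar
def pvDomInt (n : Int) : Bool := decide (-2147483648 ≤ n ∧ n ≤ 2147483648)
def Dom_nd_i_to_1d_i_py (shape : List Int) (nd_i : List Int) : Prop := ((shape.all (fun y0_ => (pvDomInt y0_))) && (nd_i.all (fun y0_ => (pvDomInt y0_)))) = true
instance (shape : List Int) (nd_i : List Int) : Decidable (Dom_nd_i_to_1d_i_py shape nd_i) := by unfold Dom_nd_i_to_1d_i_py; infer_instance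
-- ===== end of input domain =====

-- B replaces A's interleaved Horner accumulation by a precomputed strides table
-- (right-to-left suffix-product pass) followed by a strides·index dot product; same O(d) cost.


-- ===== PORT A =====
-- A's loop walks nd_i with the running dimension and reads shape[dim]; under
-- Pre_ the lengths are equal, so the loop is the lockstep recursion below
-- (the `_ :: _, []` arm is unreachable inside Pre_).
def ndLoopA : List Int → List Int → Int → Int
  | [], _, index => index
  | _ :: _, [], index => index
  | d :: ds, s :: ss, index => ndLoopA ds ss (index * s + d)

def nd_i_to_1d_i_py (shape : List Int) (nd_i : List Int) : Int :=
  ndLoopA nd_i shape 0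

-- ===== PORT B =====
-- right-to-left pass: returns (strides table, running product of all dims)
def stridesB : List Int → List Int × Int
  | [] => ([], 1)
  | s :: rest =>
    let (st, p) := stridesB rest
    (p :: st, s * p)

def nd_i_to_1d_i_py_alt (shape : List Int) (nd_i : List Int) : Int :=
  let strides := (stridesB shape).1
  (nd_i.zip strides).foldl (fun index p => index + p.2 * p.1) 0

-- ===== PRECONDITION & SPEC =====
-- Pre_ excludes exactly the inputs on which A's asserts raise AssertionError:
-- mismatched lengths, or some nd_i[dim] ≥ shape[dim].
def Pre_nd_i_to_1d_i_py (shape : List Int) (nd_i : List Int) : Prop :=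
  nd_i.length = shape.length ∧ ∀ p ∈ nd_i.zip shape, p.1 < p.2
instance (shape : List Int) (nd_i : List Int) : Decidable (Pre_nd_i_to_1d_i_py shape nd_i) := by unfold Pre_nd_i_to_1d_i_py; infer_instance

def pvWitness_nd_i_to_1d_i_py : List Int × List Int := ([2, 3, 4], [1, 2, 3])

def Spec_nd_i_to_1d_i_py (shape : List Int) (nd_i : List Int) (out : Int) : Prop := out = nd_i_to_1d_i_py_alt shape nd_i
instance (shape : List Int) (nd_i : List Int) (out : Int) : Decidable (Spec_nd_i_to_1d_i_py shape nd_i out) := by unfold Spec_nd_i_to_1d_i_py; infer_instance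

-- ===== CLAIM (what is proved, stated in full; the proofs are below) =====
def Claim_equal_nd_i_to_1d_i_py : Prop := ∀ (shape : List Int) (nd_i : List Int), Dom_nd_i_to_1d_i_py shape nd_i → Pre_nd_i_to_1d_i_py shape nd_i → Spec_nd_i_to_1d_i_py shape nd_i (nd_i_to_1d_i_py shape nd_i)

-- ===== LEMMAS AND PROOFS =====
lemma dot_shift (l : List (Int × Int)) (a : Int) :
    l.foldl (fun index p => index + p.2 * p.1) a
      = a + l.foldl (fun index p => index + p.2 * p.1) 0 := by
  induction l generalizing a with
  | nil => simp
  | cons x xs ih =>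
    simp only [List.foldl_cons]
    rw [ih, ih (0 + x.2 * x.1)]
    ring

lemma ndLoopA_eq (nd ss : List Int) (acc : Int) (h : nd.length = ss.length) :
    ndLoopA nd ss acc
      = acc * (stridesB ss).2
        + (nd.zip (stridesB ss).1).foldl (fun index p => index + p.2 * p.1) 0 := by
  induction nd generalizing ss acc with
  | nil =>
    cases ss with
    | nil => simp [ndLoopA, stridesB]
    | cons s ss' => simp at h
  | cons d ds ih =>
    cases ss with
    | nil => simp at h
    | cons s ss' =>
      simp only [List.length_cons, Nat.succ.injEq] at h
      simp only [ndLoopA, stridesB, List.zip_cons_cons, List.foldl_cons]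
      rw [ih ss' _ h, dot_shift, dot_shift (ds.zip (stridesB ss').1) (0 + (stridesB ss').2 * d)]
      ring

-- ===== VERDICT (by name: the statement is the Claim_ definition above) =====
theorem nd_i_to_1d_i_py_spec : Claim_equal_nd_i_to_1d_i_py := by
  intro shape nd_i _ hpre
  unfold Spec_nd_i_to_1d_i_py nd_i_to_1d_i_py nd_i_to_1d_i_py_alt
  rw [ndLoopA_eq nd_i shape 0 hpre.1]
  ring
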